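-- pv_equiv track=rewrite | github.com/reginaib/Programming | Series_05/table_talk.py | chemify
-- ===== SOURCE A (Python) =====
-- def chemifyWord(word):
--     i = 0
--     for char in reversed(word):
--         if char.lower() not in 'aeiouy':
--             break
--         i += 1
--     if i:
--         return word[:-i] + 'ium'
--     elif word.endswith('ium'):
--         return word
--     return word + 'ium'
--
-- def chemify(sentence: str):
--     output = ''
--     word = ''
--     for char in sentence:
--         if char.isalpha():
--             word += char
--         else:
--             if word:
--                 output += chemifyWord(word)
--                 word = ''
--             output += char
--     if word:
--         output += chemifyWord(word)
--     return output
-- ===== SOURCE B (Python) =====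
-- def chemifyWord(word):
--     stem = word.rstrip('aeiouyAEIOUY')
--     if len(stem) != len(word):
--         return stem + 'ium'
--     if word.endswith('ium'):
--         return word
--     return word + 'ium'
--
-- def chemify(sentence: str):
--     parts = []
--     i, n = 0, len(sentence)
--     while i < n:
--         j = i + 1
--         if sentence[i].isalpha():
--             while j < n and sentence[j].isalpha():
--                 j += 1
--             parts.append(chemifyWord(sentence[i:j]))
--         else:
--             while j < n and not sentence[j].isalpha():
--                 j += 1
--             parts.append(sentence[i:j])
--         i = j
--     return ''.join(parts)
-- ===== Notes on version B (the rewrite author's own statement) =====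
-- stated objective: alternative
-- what changed: chemify is rewritten as a two-index run scanner that slices maximal alphabetic/non-alphabetic runs and joins chemifyWord applied to whole words, replacing A's char-by-char accumulate-and-flush state machine; chemifyWord's reversed counting loop becomes an rstrip of the vowel set.
import Mathlib
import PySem

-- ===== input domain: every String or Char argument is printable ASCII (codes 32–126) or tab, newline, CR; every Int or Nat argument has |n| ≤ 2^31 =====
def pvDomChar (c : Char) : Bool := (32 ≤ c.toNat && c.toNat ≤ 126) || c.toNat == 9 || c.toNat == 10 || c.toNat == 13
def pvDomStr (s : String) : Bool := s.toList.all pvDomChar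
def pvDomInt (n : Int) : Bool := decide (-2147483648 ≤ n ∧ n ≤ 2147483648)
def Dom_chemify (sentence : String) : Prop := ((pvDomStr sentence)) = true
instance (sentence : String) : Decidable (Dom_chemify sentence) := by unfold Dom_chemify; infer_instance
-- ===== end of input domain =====

-- B replaces A's char-by-char accumulate-and-flush state machine by a run scanner that
-- slices maximal alphabetic / non-alphabetic runs and maps chemifyWord over whole words
-- (objective: alternative decomposition of the same computation).

-- ===== PORT A =====
-- `i = 0; for char in reversed(word): if char.lower() not in 'aeiouy': break; i += 1`
-- ported as structural recursion over the reversed character list (break → return of the count).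
-- Python's single-char `in 'aeiouy'` is ported as element membership (exact for one character).
def chemCountTrailA (rev : List Char) : Nat :=
  match rev with
  | [] => 0
  | c :: cs =>
    if "aeiouy".toList.contains (PySem.Chars.lowerChar c) then chemCountTrailA cs + 1 else 0

def chemifyWordA (word : List Char) : List Char :=
  let i := chemCountTrailA word.reverse
  if i ≠ 0 then
    PySem.List.slice word none (some (-(i : Int))) ++ "ium".toList   -- word[:-i] + 'ium'
  else if PySem.Chars.endswith word "ium".toList then word
  else word ++ "ium".toList

def chemStepA (st : List Char × List Char) (c : Char) : List Char × List Char :=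
  if PySem.Chars.isalpha c then (st.1, st.2 ++ [c])
  else if st.2 ≠ [] then (st.1 ++ chemifyWordA st.2 ++ [c], [])
  else (st.1 ++ [c], [])

def chemify (sentence : String) : String :=
  let st := sentence.toList.foldl chemStepA ([], [])
  String.mk (if st.2 ≠ [] then st.1 ++ chemifyWordA st.2 else st.1)

-- ===== PORT B =====
-- `word.rstrip('aeiouyAEIOUY')` ported by hand (no PySem rstrip-with-chars primitive):
-- drop the strip-set characters from the reversed list — exact for this ASCII strip set.
def chemifyWordB (word : List Char) : List Char :=
  let stem := ((word.reverse.dropWhile (fun c => "aeiouyAEIOUY".toList.contains c)).reverse)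
  if stem.length ≠ word.length then stem ++ "ium".toList
  else if PySem.Chars.endswith word "ium".toList then word
  else word ++ "ium".toList

-- Source B's two-index scan: advance j through the maximal run of the head's isalpha class,
-- emit the run (chemified if alphabetic), continue after it; takeWhile/dropWhile are the
-- run slice sentence[i:j] and the continuation at j.
def chemRunsB (cs : List Char) : List Char :=
  match cs with
  | [] => []
  | c :: cs =>
    if PySem.Chars.isalpha c then
      chemifyWordB (c :: cs.takeWhile PySem.Chars.isalpha) ++
        chemRunsB (cs.dropWhile PySem.Chars.isalpha)
    else
      (c :: cs.takeWhile (fun d => !PySem.Chars.isalpha d)) ++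
        chemRunsB (cs.dropWhile (fun d => !PySem.Chars.isalpha d))
  termination_by cs.length
  decreasing_by
  · exact Nat.lt_succ_of_le (List.length_dropWhile_le _ _)
  · exact Nat.lt_succ_of_le (List.length_dropWhile_le _ _)

def chemify_alt (sentence : String) : String :=
  String.mk (chemRunsB sentence.toList)

-- ===== PRECONDITION & SPEC =====
def Spec_chemify (sentence : String) (out : String) : Prop := out = chemify_alt sentence
instance (sentence : String) (out : String) : Decidable (Spec_chemify sentence out) := by unfold Spec_chemify; infer_instance

-- ===== CLAIM (what is proved, stated in full; the proofs are below) =====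
def Claim_equal_chemify : Prop := ∀ (sentence : String), Dom_chemify sentence → Spec_chemify sentence (chemify sentence)

-- ===== LEMMAS AND PROOFS =====

-- the two vowel tests agree on every character
lemma chem_vowel_eq (c : Char) :
    "aeiouy".toList.contains (PySem.Chars.lowerChar c) = "aeiouyAEIOUY".toList.contains c := by
  have he : ∀ (d v : Char), (d = v) ↔ d.toNat = v.toNat := by
    intro d v
    constructor
    · intro h; rw [h]
    · intro h
      exact Char.ext_iff.mpr (UInt32.toNat_inj.mp h)
  have hiff : (PySem.Chars.lowerChar c ∈ "aeiouy".toList) ↔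
      (c ∈ "aeiouyAEIOUY".toList) := by
    show PySem.Chars.lowerChar c ∈ ['a','e','i','o','u','y'] ↔
      c ∈ ['a','e','i','o','u','y','A','E','I','O','U','Y']
    unfold PySem.Chars.lowerChar PySem.Chars.isupper
    split_ifs with h
    · have hc : 65 ≤ c.toNat ∧ c.toNat ≤ 90 := by
        simp only [Bool.and_eq_true, decide_eq_true_eq, Char.le_def] at h
        exact h
      have hvalid : (c.toNat + 32).isValidChar := Or.inl (by omega)
      have htn : (Char.ofNat (c.toNat + 32)).toNat = c.toNat + 32 := by
        rw [Char.toNat_ofNat, if_pos hvalid]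
      simp only [List.mem_cons, List.not_mem_nil, or_false, he, htn]
      simp only [show ('a':Char).toNat = 97 from rfl, show ('e':Char).toNat = 101 from rfl,
        show ('i':Char).toNat = 105 from rfl, show ('o':Char).toNat = 111 from rfl,
        show ('u':Char).toNat = 117 from rfl, show ('y':Char).toNat = 121 from rfl,
        show ('A':Char).toNat = 65 from rfl, show ('E':Char).toNat = 69 from rfl,
        show ('I':Char).toNat = 73 from rfl, show ('O':Char).toNat = 79 from rfl,
        show ('U':Char).toNat = 85 from rfl, show ('Y':Char).toNat = 89 from rfl]
      omega
    · have hc : ¬ (65 ≤ c.toNat ∧ c.toNat ≤ 90) := by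
        simp only [Bool.and_eq_true, decide_eq_true_eq, Char.le_def] at h
        intro hcon
        exact h ⟨hcon.1, hcon.2⟩
      simp only [List.mem_cons, List.not_mem_nil, or_false, he]
      simp only [show ('a':Char).toNat = 97 from rfl, show ('e':Char).toNat = 101 from rfl,
        show ('i':Char).toNat = 105 from rfl, show ('o':Char).toNat = 111 from rfl,
        show ('u':Char).toNat = 117 from rfl, show ('y':Char).toNat = 121 from rfl,
        show ('A':Char).toNat = 65 from rfl, show ('E':Char).toNat = 69 from rfl,
        show ('I':Char).toNat = 73 from rfl, show ('O':Char).toNat = 79 from rfl,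
        show ('U':Char).toNat = 85 from rfl, show ('Y':Char).toNat = 89 from rfl]
      omega
  by_cases hm : c ∈ "aeiouyAEIOUY".toList
  · rw [List.contains_iff_mem.mpr hm, List.contains_iff_mem.mpr (hiff.mpr hm)]
  · have hl : ¬ PySem.Chars.lowerChar c ∈ "aeiouy".toList := fun hx => hm (hiff.mp hx)
    rw [Bool.eq_iff_iff]
    constructor
    · intro hx; exact absurd (List.contains_iff_mem.mp hx) hl
    · intro hx; exact absurd (List.contains_iff_mem.mp hx) hm

-- A's trailing-vowel count is the takeWhile length for B's strip predicate
lemma chemCountTrailA_eq (l : List Char) :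
    chemCountTrailA l = (l.takeWhile (fun c => "aeiouyAEIOUY".toList.contains c)).length := by
  induction l with
  | nil => rfl
  | cons c cs ih =>
    rw [chemCountTrailA, chem_vowel_eq, List.takeWhile_cons]
    by_cases h : "aeiouyAEIOUY".toList.contains c = true
    · rw [if_pos h, if_pos h, List.length_cons, ih]
    · rw [if_neg h, if_neg h]
      rfl

-- the two word transformers agree
lemma chemifyWord_eq (w : List Char) : chemifyWordA w = chemifyWordB w := by
  have hcount : chemCountTrailA w.reverse =
      (w.reverse.takeWhile (fun c => "aeiouyAEIOUY".toList.contains c)).length :=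
    chemCountTrailA_eq w.reverse
  have hsplit : w.reverse.takeWhile (fun c => "aeiouyAEIOUY".toList.contains c) ++
      w.reverse.dropWhile (fun c => "aeiouyAEIOUY".toList.contains c) = w.reverse :=
    List.takeWhile_append_dropWhile
  have hlen : (w.reverse.takeWhile (fun c => "aeiouyAEIOUY".toList.contains c)).length +
      (w.reverse.dropWhile (fun c => "aeiouyAEIOUY".toList.contains c)).length = w.length := by
    have h1 := congrArg List.length hsplit
    rw [List.length_append, List.length_reverse] at h1
    exact h1
  unfold chemifyWordA chemifyWordB
  simp only []
  rw [hcount]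
  by_cases h0 : (w.reverse.takeWhile (fun c => "aeiouyAEIOUY".toList.contains c)).length = 0
  · -- no trailing vowels: the stem is the whole word, both fall through identically
    have htw : w.reverse.takeWhile (fun c => "aeiouyAEIOUY".toList.contains c) = [] :=
      List.length_eq_zero_iff.mp h0
    have hdw : w.reverse.dropWhile (fun c => "aeiouyAEIOUY".toList.contains c) = w.reverse := by
      conv_rhs => rw [← hsplit, htw, List.nil_append]
    have h0' : ¬((w.reverse.takeWhile (fun c => "aeiouyAEIOUY".toList.contains c)).length ≠ 0) := by
      omega
    rw [if_neg h0', hdw, List.reverse_reverse,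
      if_neg (show ¬(w.length ≠ w.length) by omega)]
  · -- trailing vowels exist: A's word[:-i] equals B's stem
    have hpos : 0 < (w.reverse.takeWhile (fun c => "aeiouyAEIOUY".toList.contains c)).length :=
      Nat.pos_of_ne_zero h0
    rw [if_pos h0, PySem.List.slice_to_neg_natCast w _ hpos]
    have hw : w = (w.reverse.dropWhile (fun c => "aeiouyAEIOUY".toList.contains c)).reverse ++
        (w.reverse.takeWhile (fun c => "aeiouyAEIOUY".toList.contains c)).reverse := by
      rw [← List.reverse_append, hsplit, List.reverse_reverse]
    have hlen2 : w.length -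
        (w.reverse.takeWhile (fun c => "aeiouyAEIOUY".toList.contains c)).length =
        ((w.reverse.dropWhile (fun c => "aeiouyAEIOUY".toList.contains c)).reverse).length := by
      rw [List.length_reverse]
      omega
    generalize hD : (w.reverse.dropWhile (fun c => "aeiouyAEIOUY".toList.contains c)).reverse = D
      at hw hlen2 ⊢
    generalize hT : (w.reverse.takeWhile (fun c => "aeiouyAEIOUY".toList.contains c)).reverse = T
      at hw
    have hDne : D.length ≠ w.length := by omega
    rw [if_pos hDne, hlen2, hw, List.take_left]

-- B's run recursion absorbs a leading non-alphabetic run taken off separately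
lemma chemRuns_absorb (cs : List Char) :
    cs.takeWhile (fun d => !PySem.Chars.isalpha d) ++
      chemRunsB (cs.dropWhile (fun d => !PySem.Chars.isalpha d)) = chemRunsB cs := by
  cases cs with
  | nil => rfl
  | cons d cs =>
    by_cases hd : PySem.Chars.isalpha d
    · rw [List.takeWhile_cons_of_neg (by simp [hd]), List.dropWhile_cons_of_neg (by simp [hd]),
        List.nil_append]
    · rw [List.takeWhile_cons_of_pos (by simp [hd]), List.dropWhile_cons_of_pos (by simp [hd])]
      conv_rhs => rw [chemRunsB]
      rw [if_neg hd]

-- the output component of A's fold is a pure accumulator: a start value only prefixes it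
lemma chemFold_prefix (cs : List Char) :
    ∀ (out w : List Char),
      cs.foldl chemStepA (out, w) =
        ((out ++ (cs.foldl chemStepA ([], w)).1), (cs.foldl chemStepA ([], w)).2) := by
  induction cs with
  | nil => intro out w; simp
  | cons c cs ih =>
    intro out w
    by_cases hc : PySem.Chars.isalpha c
    · have hs : ∀ o : List Char, chemStepA (o, w) c = (o, w ++ [c]) := by
        intro o; simp [chemStepA, hc]
      simp only [List.foldl_cons, hs]
      exact ih out (w ++ [c])
    · by_cases hw : w = []
      · subst hw
        have hs : ∀ o : List Char, chemStepA (o, []) c = (o ++ [c], []) := by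
          intro o; simp [chemStepA, hc]
        simp only [List.foldl_cons, hs, List.nil_append]
        rw [ih [c] [], ih (out ++ [c]) []]
        simp
      · have hs : ∀ o : List Char, chemStepA (o, w) c = (o ++ chemifyWordA w ++ [c], []) := by
          intro o; simp [chemStepA, hc, hw]
        simp only [List.foldl_cons, hs, List.nil_append]
        rw [ih (chemifyWordA w ++ [c]) [], ih (out ++ chemifyWordA w ++ [c]) []]
        simp

-- A's full result from output [] and pending word w (proof-side view of chemify's body)
def chemRes (w cs : List Char) : List Char :=
  let st := cs.foldl chemStepA ([], w)
  if st.2 ≠ [] then st.1 ++ chemifyWordA st.2 else st.1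

-- flush of a pending (possibly empty) word
def chemFlush (w : List Char) : List Char := if w ≠ [] then chemifyWordA w else []

lemma chemRes_nonalpha_step (c : Char) (cs w : List Char) (hc : ¬ PySem.Chars.isalpha c = true) :
    chemRes w (c :: cs) = chemFlush w ++ c :: chemRes [] cs := by
  have hs : chemStepA ([], w) c = (chemFlush w ++ [c], []) := by
    by_cases hw : w = [] <;> simp [chemStepA, chemFlush, hc, hw]
  unfold chemRes
  simp only [List.foldl_cons, hs]
  rw [chemFold_prefix cs (chemFlush w ++ [c]) []]
  by_cases h2 : (cs.foldl chemStepA ([], [])).2 = [] <;> simp [h2]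

-- main invariant: A's fold from pending word w = flush of the extended word + B's runs
lemma chemRes_eq (cs : List Char) :
    ∀ w, chemRes w cs =
      chemFlush (w ++ cs.takeWhile PySem.Chars.isalpha) ++
        chemRunsB (cs.dropWhile PySem.Chars.isalpha) := by
  induction cs with
  | nil =>
    intro w
    by_cases hw : w = [] <;> simp [chemRes, chemRunsB, chemFlush, hw]
  | cons c cs ih =>
    intro w
    by_cases hc : PySem.Chars.isalpha c
    · have hs : chemStepA ([], w) c = ([], w ++ [c]) := by simp [chemStepA, hc]
      have hstep : chemRes w (c :: cs) = chemRes (w ++ [c]) cs := by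
        unfold chemRes
        simp only [List.foldl_cons, hs]
      rw [hstep, ih (w ++ [c]),
        List.takeWhile_cons_of_pos hc, List.dropWhile_cons_of_pos hc]
      simp
    · -- non-alphabetic head: flush, emit c, restart with empty word
      have hruns : chemRes [] cs = chemRunsB cs := by
        rw [ih []]
        cases cs with
        | nil => simp [chemFlush, chemRunsB]
        | cons d cs' =>
          by_cases hd : PySem.Chars.isalpha d
          · rw [List.takeWhile_cons_of_pos hd, List.dropWhile_cons_of_pos hd]
            conv_rhs => rw [chemRunsB]
            rw [if_pos hd]
            have hne : (d :: cs'.takeWhile PySem.Chars.isalpha) ≠ [] := by simp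
            simp only [List.nil_append, chemFlush, if_pos hne]
            rw [chemifyWord_eq]
          · rw [List.takeWhile_cons_of_neg hd, List.dropWhile_cons_of_neg hd]
            simp [chemFlush]
      rw [chemRes_nonalpha_step c cs w hc, hruns,
        List.takeWhile_cons_of_neg hc, List.dropWhile_cons_of_neg hc]
      conv_rhs => rw [chemRunsB]
      rw [if_neg hc, List.cons_append, chemRuns_absorb cs]
      simp

-- corollary: A's whole run from the empty state is B's run recursion
lemma chemRes_runs (cs : List Char) : chemRes [] cs = chemRunsB cs := by
  rw [chemRes_eq cs []]
  cases cs with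
  | nil => simp [chemFlush, chemRunsB]
  | cons d cs' =>
    by_cases hd : PySem.Chars.isalpha d
    · rw [List.takeWhile_cons_of_pos hd, List.dropWhile_cons_of_pos hd]
      conv_rhs => rw [chemRunsB]
      rw [if_pos hd]
      have hne : (d :: cs'.takeWhile PySem.Chars.isalpha) ≠ [] := by simp
      simp only [List.nil_append, chemFlush, if_pos hne]
      rw [chemifyWord_eq]
    · rw [List.takeWhile_cons_of_neg hd, List.dropWhile_cons_of_neg hd]
      simp [chemFlush]

-- ===== VERDICT (by name: the statement is the Claim_ definition above) =====
theorem chemify_spec : Claim_equal_chemify := by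
  intro sentence _
  unfold Spec_chemify chemify chemify_alt
  rw [← chemRes_runs sentence.toList]
  rfl
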